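-- pv_equiv track=rewrite | github.com/mmontalbo/binary_lens | scripts/errors/messages.py | _prioritize_emitter_callsites
-- ===== SOURCE A (Python) =====
-- def _prioritize_emitter_callsites(emitter_callsites, candidate_func_ids, max_emitters):
--     """Return emitters to scan, prioritizing functions with candidate strings."""
--     if candidate_func_ids:
--         preferred_callsites = []
--         other_callsites = []
--         for callsite in emitter_callsites:
--             if callsite.get("function_id") in candidate_func_ids:
--                 preferred_callsites.append(callsite)
--             else:
--                 other_callsites.append(callsite)
--         considered_callsites = preferred_callsites + other_callsites
--     else:
--         considered_callsites = emitter_callsites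
--
--     truncated_emitters = False
--     if max_emitters and len(considered_callsites) > max_emitters:
--         considered_callsites = considered_callsites[:max_emitters]
--         truncated_emitters = True
--     return considered_callsites, truncated_emitters
-- ===== SOURCE B (Python) =====
-- def _prioritize_emitter_callsites(emitter_callsites, candidate_func_ids, max_emitters):
--     """Return emitters to scan, prioritizing functions with candidate strings."""
--     candidates = set(candidate_func_ids)
--     if not candidates:
--         considered = emitter_callsites
--     else:
--         considered = sorted(
--             emitter_callsites,
--             key=lambda callsite: callsite.get("function_id") not in candidates,
--         )
--     truncated = bool(max_emitters) and len(considered) > max_emitters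
--     return (considered[:max_emitters] if truncated else considered), truncated
-- ===== Notes on version B (the rewrite author's own statement) =====
-- stated objective: faster
-- what changed: The hand-rolled preferred/other two-list partition loop with an O(k) list-membership test per callsite becomes one stable sorted() call keyed by membership in a precomputed set of candidate ids, and the mutated truncated flag becomes a single boolean expression with a conditional slice in the return.
import Mathlib
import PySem

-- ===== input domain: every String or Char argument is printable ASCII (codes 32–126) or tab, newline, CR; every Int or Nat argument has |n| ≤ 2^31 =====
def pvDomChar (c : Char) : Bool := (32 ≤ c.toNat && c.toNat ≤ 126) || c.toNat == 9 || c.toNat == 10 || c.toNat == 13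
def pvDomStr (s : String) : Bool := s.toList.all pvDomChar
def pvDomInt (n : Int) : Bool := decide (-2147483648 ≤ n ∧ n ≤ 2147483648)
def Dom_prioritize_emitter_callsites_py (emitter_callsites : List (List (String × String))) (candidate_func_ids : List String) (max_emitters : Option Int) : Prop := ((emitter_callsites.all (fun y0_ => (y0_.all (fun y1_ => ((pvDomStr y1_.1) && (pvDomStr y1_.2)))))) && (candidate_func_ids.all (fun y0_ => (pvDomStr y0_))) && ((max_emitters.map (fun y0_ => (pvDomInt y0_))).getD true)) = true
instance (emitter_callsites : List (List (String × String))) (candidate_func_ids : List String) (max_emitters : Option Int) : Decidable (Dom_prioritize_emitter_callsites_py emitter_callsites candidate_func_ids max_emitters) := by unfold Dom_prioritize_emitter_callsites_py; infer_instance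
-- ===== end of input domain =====

-- B replaces A's two-list partition loop (O(k) list membership per callsite) by one stable
-- sort keyed by membership in a precomputed set of candidate ids, and the mutated truncated
-- flag by a boolean expression; same return value, measured faster in a timing run.

-- ===== PORT A =====
-- callsite.get("function_id") in candidate_func_ids (.get = first match; None-in-list is False)
def pvHasCandidate (callsite : List (String × String)) (candidate_func_ids : List String) : Bool :=
  match (callsite.find? (fun kv => kv.1 == "function_id")).map (·.2) with
  | some s => candidate_func_ids.contains s
  | none => false

def prioritize_emitter_callsites_py (emitter_callsites : List (List (String × String))) (candidate_func_ids : List String) (max_emitters : Option Int) : (List (List (String × String))) × Bool :=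
  let considered_callsites :=
    if candidate_func_ids ≠ [] then
      -- the for-loop building preferred_callsites / other_callsites
      let po := emitter_callsites.foldl
        (fun acc callsite =>
          if pvHasCandidate callsite candidate_func_ids then (acc.1 ++ [callsite], acc.2)
          else (acc.1, acc.2 ++ [callsite]))
        ([], [])
      po.1 ++ po.2
    else emitter_callsites
  -- truncated_emitters = False; if max_emitters and len(...) > max_emitters: slice, True
  match max_emitters with
  | none => (considered_callsites, false)
  | some m =>
    if m ≠ 0 ∧ (considered_callsites.length : Int) > m then
      (PySem.List.slice considered_callsites none (some m), true)
    else (considered_callsites, false)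

-- ===== PORT B =====
def prioritize_emitter_callsites_py_alt (emitter_callsites : List (List (String × String))) (candidate_func_ids : List String) (max_emitters : Option Int) : (List (List (String × String))) × Bool :=
  let candidates : PySem.Set String := PySem.Set.ofList candidate_func_ids
  let considered :=
    if candidates = [] then emitter_callsites
    else
      -- sorted(..., key=lambda c: c.get("function_id") not in candidates); bool key ported as 0/1
      PySem.List.sorted emitter_callsites
        (fun callsite =>
          if ((PySem.Dict.mk callsite).get? "function_id").any
              (fun fid => PySem.Set.contains candidates fid) then (0 : Nat) else 1)
  let truncated :=
    match max_emitters with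
    | none => false
    | some m => (m != 0) && decide ((considered.length : Int) > m)
  ((if truncated then PySem.List.slice considered none max_emitters else considered), truncated)

-- ===== PRECONDITION & SPEC =====
def Spec_prioritize_emitter_callsites_py (emitter_callsites : List (List (String × String))) (candidate_func_ids : List String) (max_emitters : Option Int) (out : (List (List (String × String))) × Bool) : Prop := out = prioritize_emitter_callsites_py_alt emitter_callsites candidate_func_ids max_emitters
instance (emitter_callsites : List (List (String × String))) (candidate_func_ids : List String) (max_emitters : Option Int) (out : (List (List (String × String))) × Bool) : Decidable (Spec_prioritize_emitter_callsites_py emitter_callsites candidate_func_ids max_emitters out) := by unfold Spec_prioritize_emitter_callsites_py; infer_instance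

-- ===== CLAIM (what is proved, stated in full; the proofs are below) =====
def Claim_equal_prioritize_emitter_callsites_py : Prop := ∀ (emitter_callsites : List (List (String × String))) (candidate_func_ids : List String) (max_emitters : Option Int), Dom_prioritize_emitter_callsites_py emitter_callsites candidate_func_ids max_emitters → Spec_prioritize_emitter_callsites_py emitter_callsites candidate_func_ids max_emitters (prioritize_emitter_callsites_py emitter_callsites candidate_func_ids max_emitters)

-- ===== LEMMAS AND PROOFS =====

-- B's key test equals A's membership test
theorem alt_key_eq (cs : List String) (c : List (String × String)) :
    ((PySem.Dict.mk c).get? "function_id").any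
      (fun fid => PySem.Set.contains (PySem.Set.ofList cs) fid)
    = pvHasCandidate c cs := by
  induction c with
  | nil => simp [pvHasCandidate, PySem.Dict.get?]
  | cons kv rest ih =>
    rcases kv with ⟨k, v⟩
    rw [PySem.Dict.get?_mk_cons]
    by_cases hk : k == "function_id"
    · simp only [if_pos, Option.any_some, pvHasCandidate, List.find?_cons, hk]
      simp [PySem.Set.contains, PySem.Set.mem_ofList]
    · simp only [pvHasCandidate, List.find?_cons]
      rw [if_neg hk] at *
      simp only [Bool.not_eq_true] at hk
      simp only [hk]
      exact ih

-- Set.ofList is empty iff the list is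
theorem ofList_eq_nil_iff (cs : List String) : (PySem.Set.ofList cs = []) ↔ cs = [] := by
  constructor
  · intro h
    cases cs with
    | nil => rfl
    | cons x xs =>
      exfalso
      have : x ∈ PySem.Set.ofList (x :: xs) := (PySem.Set.mem_ofList _ _).2 (by simp)
      rw [h] at this; simp at this
  · intro h; subst h; rfl

-- A's partition loop: the fold returns (pref ++ filter p, other ++ filter ¬p)
theorem partition_foldl {α : Type} (p : α → Bool) (xs : List α) (pr ot : List α) :
    xs.foldl
      (fun acc c => if p c then (acc.1 ++ [c], acc.2) else (acc.1, acc.2 ++ [c]))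
      (pr, ot)
    = (pr ++ xs.filter p, ot ++ xs.filter (fun c => !p c)) := by
  induction xs generalizing pr ot with
  | nil => simp
  | cons x xs ih =>
    cases hx : p x <;> simp [List.foldl_cons, hx, ih]

-- inserting a key-0 element into (key-0 block ++ key-1 block) lands at the block boundary
theorem insertBy_key0 {α : Type} (p : α → Bool) (x : α) (hx : p x = true)
    (P O : List α) (hP : ∀ y ∈ P, p y = true) (hO : ∀ y ∈ O, p y = false) :
    PySem.List.insertBy
      (fun a b => decide ((if p a then (0 : Nat) else 1) < (if p b then (0 : Nat) else 1)))
      x (P ++ O) = (P ++ [x]) ++ O := by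
  induction P with
  | nil =>
    cases O with
    | nil => simp [PySem.List.insertBy]
    | cons z os =>
      have hz : p z = false := hO z (by simp)
      simp [PySem.List.insertBy, hx, hz]
  | cons q P ih =>
    have hq : p q = true := hP q (by simp)
    have := ih (fun y hy => hP y (by simp [hy]))
    simp [PySem.List.insertBy, hx, hq, this]

-- the insertion-sort fold with a 0/1 key keeps the two stable blocks
theorem foldl_insertBy_binary {α : Type} (p : α → Bool) (xs : List α)
    (P O : List α) (hP : ∀ y ∈ P, p y = true) (hO : ∀ y ∈ O, p y = false) :
    xs.foldl
      (fun acc x => PySem.List.insertBy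
        (fun a b => decide ((if p a then (0 : Nat) else 1) < (if p b then (0 : Nat) else 1)))
        x acc)
      (P ++ O)
    = (P ++ xs.filter p) ++ (O ++ xs.filter (fun c => !p c)) := by
  induction xs generalizing P O with
  | nil => simp
  | cons x xs ih =>
    cases hx : p x with
    | true =>
      have hP' : ∀ y ∈ P ++ [x], p y = true := by
        intro y hy
        rcases List.mem_append.1 hy with h | h
        · exact hP y h
        · simp at h; subst h; exact hx
      rw [List.foldl_cons, insertBy_key0 p x hx P O hP hO, ih (P ++ [x]) O hP' hO]
      simp [hx]
    | false =>
      have hO' : ∀ y ∈ O ++ [x], p y = false := by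
        intro y hy
        rcases List.mem_append.1 hy with h | h
        · exact hO y h
        · simp at h; subst h; exact hx
      have hnb : ∀ y ∈ P ++ O,
          (fun a b => decide ((if p a then (0 : Nat) else 1) < (if p b then (0 : Nat) else 1))) x y
            = false := by
        intro y _
        cases hy : p y <;> simp [hx, hy]
      rw [List.foldl_cons, PySem.List.insertBy_of_forall_not_before _ x (P ++ O) hnb,
        List.append_assoc, ih P (O ++ [x]) hP hO']
      simp [hx]

-- stable sort by a 0/1 key IS the partition
theorem sorted_binary_eq_partition {α : Type} (p : α → Bool) (xs : List α) :
    PySem.List.sorted xs (fun c => if p c then (0 : Nat) else 1)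
    = xs.filter p ++ xs.filter (fun c => !p c) := by
  rw [PySem.List.sorted_eq_foldl_insertBy]
  simpa using foldl_insertBy_binary p xs [] [] (by simp) (by simp)

-- ===== VERDICT (by name: the statement is the Claim_ definition above) =====
theorem prioritize_emitter_callsites_py_spec : Claim_equal_prioritize_emitter_callsites_py := by
  intro e cs me _
  unfold Spec_prioritize_emitter_callsites_py
  unfold prioritize_emitter_callsites_py prioritize_emitter_callsites_py_alt
  simp only [alt_key_eq, ofList_eq_nil_iff]
  have hcons :
      (if cs ≠ [] then
        (let po := e.foldl
          (fun acc callsite =>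
            if pvHasCandidate callsite cs then (acc.1 ++ [callsite], acc.2)
            else (acc.1, acc.2 ++ [callsite])) ([], []);
         po.1 ++ po.2)
       else e)
      = (if cs = [] then e
         else PySem.List.sorted e (fun c => if pvHasCandidate c cs then (0 : Nat) else 1)) := by
    by_cases h : cs = []
    · simp [h]
    · rw [if_pos h, if_neg h, sorted_binary_eq_partition (fun c => pvHasCandidate c cs) e,
        partition_foldl (fun c => pvHasCandidate c cs) e [] []]
      simp
  rw [hcons]
  set c := (if cs = [] then e
    else PySem.List.sorted e (fun c => if pvHasCandidate c cs then (0 : Nat) else 1)) with hc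
  cases me with
  | none => simp
  | some m =>
    by_cases h : m ≠ 0 ∧ (c.length : Int) > m
    · have : ((m != 0) && decide ((c.length : Int) > m)) = true := by
        simp [h.1, h.2]
      simp [h]
    · have : ((m != 0) && decide ((c.length : Int) > m)) = false := by
        rcases not_and_or.1 h with h1 | h2
        · simp at h1; simp [h1]
        · simp [h2]
      simp [h, this]
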